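-- pv_equiv track=rewrite | github.com/austery/thought-foundry-content | notes/fix_speaker_channels.py | update_speaker_field
-- ===== SOURCE A (Python) =====
-- def update_speaker_field(frontmatter_raw: str, channel_name: str) -> str:
--     """更新 speaker 字段为频道名"""
--     lines = frontmatter_raw.split('\n')
--     new_lines = []
--
--     for line in lines:
--         stripped = line.strip()
--
--         # 找到 speaker 字段并更新
--         if stripped.startswith('speaker:'):
--             new_lines.append(f'speaker: {channel_name}')
--         else:
--             new_lines.append(line)
--
--     return '\n'.join(new_lines)
-- ===== SOURCE B (Python) =====
-- def update_speaker_field(frontmatter_raw: str, channel_name: str) -> str: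
--     """Single streaming pass over the raw text: no intermediate list of lines.
--
--     At each line start, skip horizontal whitespace and test for the
--     'speaker:' prefix in place with str.startswith(offset, end); emit either
--     the replacement or the untouched slice, then jump to the next newline."""
--     repl = 'speaker: ' + channel_name
--     out = []
--     s = frontmatter_raw
--     i = 0
--     while True:
--         j = s.find('\n', i)
--         end = len(s) if j < 0 else j
--         k = i
--         while k < end and s[k] in ' \t\r\x0b\x0c':
--             k += 1
--         out.append(repl if s.startswith('speaker:', k, end) else s[i:end])
--         if j < 0:
--             return ''.join(out)
--         out.append('\n')
--         i = j + 1
-- ===== Notes on version B (the rewrite author's own statement) =====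
-- stated objective: alternative
-- what changed: A splits the text into a list of lines, strips each line to test for the 'speaker:' prefix, rebuilds a list and joins it; B makes a single streaming pass over the raw string with find/startswith offsets, skipping horizontal whitespace at each line start and copying or replacing slices in place, building no intermediate line list.
import Mathlib
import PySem

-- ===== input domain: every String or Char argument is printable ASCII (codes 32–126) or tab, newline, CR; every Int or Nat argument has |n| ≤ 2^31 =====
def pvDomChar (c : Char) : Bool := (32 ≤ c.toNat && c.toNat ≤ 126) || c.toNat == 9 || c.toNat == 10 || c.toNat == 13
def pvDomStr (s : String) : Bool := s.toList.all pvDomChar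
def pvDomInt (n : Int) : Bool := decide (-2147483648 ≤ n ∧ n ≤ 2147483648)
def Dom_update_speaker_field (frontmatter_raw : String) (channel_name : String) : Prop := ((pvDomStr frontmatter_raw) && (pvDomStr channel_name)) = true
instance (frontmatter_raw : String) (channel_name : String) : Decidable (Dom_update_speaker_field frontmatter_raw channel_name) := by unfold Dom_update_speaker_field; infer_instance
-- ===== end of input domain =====

-- B replaces A's split-into-lines / per-line strip / join pipeline with a single streaming
-- pass over the text (skip horizontal whitespace at each line start, test the 'speaker:'
-- prefix in place, copy or replace up to the next newline); objective: alternative.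

-- ===== PORT A =====
def update_speaker_field (frontmatter_raw : String) (channel_name : String) : String :=
  let lines := PySem.Chars.splitOn frontmatter_raw.toList ['\n']
  let new_lines := lines.foldl (fun acc line =>
    let stripped := PySem.Chars.strip line
    if PySem.Chars.startswith stripped ("speaker:".toList) then
      acc ++ [("speaker: ".toList ++ channel_name.toList)]
    else
      acc ++ [line]) []
  String.ofList (PySem.Chars.join ['\n'] new_lines)

-- ===== PORT B =====
-- Source B's membership test s[k] in ' \t\r\x0b\x0c'
def pvIsWs (c : Char) : Bool := c == ' ' || c == '\t' || c == '\r' || c == '\x0b' || c == '\x0c'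

def pvNotNl (c : Char) : Bool := c != '\n'

-- Source B's while-loop: the current line is the stretch up to the next '\n' (s.find),
-- the inner k-loop is the dropWhile, and the offset startswith is the prefix test in place.
def pvAltGo (repl : List Char) (cs : List Char) : List Char :=
  let line := cs.takeWhile pvNotNl
  let body := if PySem.Chars.startswith (line.dropWhile pvIsWs) ("speaker:".toList) then repl else line
  match h : cs.dropWhile pvNotNl with
  | [] => body
  | _ :: rs => body ++ '\n' :: pvAltGo repl rs
termination_by cs.length
decreasing_by
  have hle := List.length_dropWhile_le pvNotNl cs
  rw [h] at hle
  simp only [List.length_cons] at hle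
  omega

def update_speaker_field_alt (frontmatter_raw : String) (channel_name : String) : String :=
  String.ofList (pvAltGo ("speaker: ".toList ++ channel_name.toList) frontmatter_raw.toList)

-- ===== PRECONDITION & SPEC =====
def Spec_update_speaker_field (frontmatter_raw : String) (channel_name : String) (out : String) : Prop := out = update_speaker_field_alt frontmatter_raw channel_name
instance (frontmatter_raw : String) (channel_name : String) (out : String) : Decidable (Spec_update_speaker_field frontmatter_raw channel_name out) := by unfold Spec_update_speaker_field; infer_instance

-- ===== CLAIM (what is proved, stated in full; the proofs are below) =====
def Claim_equal_update_speaker_field : Prop := ∀ (frontmatter_raw : String) (channel_name : String), Dom_update_speaker_field frontmatter_raw channel_name → Spec_update_speaker_field frontmatter_raw channel_name (update_speaker_field frontmatter_raw channel_name)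

-- ===== LEMMAS AND PROOFS =====

-- the list of lines of cs (split at '\n')
def pvLines (cs : List Char) : List (List Char) :=
  let l := cs.takeWhile pvNotNl
  match h : cs.dropWhile pvNotNl with
  | [] => [l]
  | _ :: rs => l :: pvLines rs
termination_by cs.length
decreasing_by
  have hle := List.length_dropWhile_le pvNotNl cs
  rw [h] at hle
  simp only [List.length_cons] at hle
  omega

-- prepend p onto the first piece
def pvPrep (p : List Char) : List (List Char) → List (List Char)
  | [] => [p]
  | x :: xs => (p ++ x) :: xs

theorem pvLines_ne_nil (cs : List Char) : pvLines cs ≠ [] := by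
  rw [pvLines]; split <;> simp

theorem pvPrep_nil (L : List (List Char)) (h : L ≠ []) : pvPrep [] L = L := by
  cases L with
  | nil => exact absurd rfl h
  | cons x xs => simp [pvPrep]

theorem pvPrep_prep (p q : List Char) (L : List (List Char)) :
    pvPrep (p ++ q) L = pvPrep p (pvPrep q L) := by
  cases L <;> simp [pvPrep]

theorem pvLines_nil : pvLines [] = [[]] := by
  rw [pvLines]; simp

theorem pvLines_cons_notnl (c : Char) (rest : List Char) (hc : pvNotNl c = true) :
    pvLines (c :: rest) = pvPrep [c] (pvLines rest) := by
  rw [pvLines]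
  conv_rhs => rw [pvLines]
  split <;> split <;> simp_all [pvPrep]

theorem pvLines_cons_nl (rest : List Char) :
    pvLines ('\n' :: rest) = [] :: pvLines rest := by
  rw [pvLines]
  have hnl : pvNotNl '\n' = false := by decide
  split <;> simp_all [hnl]

theorem pvSplitOn_go_spec (fuel : Nat) : ∀ (s cur : List Char) (acc : List (List Char)),
    s.length ≤ fuel →
    PySem.Chars.splitOn.go ['\n'] fuel s cur acc = acc.reverse ++ pvPrep cur.reverse (pvLines s) := by
  induction fuel with
  | zero =>
    intro s cur acc hle
    have hs : s = [] := List.eq_nil_of_length_eq_zero (Nat.le_zero.mp hle)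
    subst hs
    rw [PySem.Chars.splitOn.go, pvLines_nil]
    simp [pvPrep]
  | succ f ih =>
    intro s cur acc hle
    cases s with
    | nil =>
      rw [PySem.Chars.splitOn.go, pvLines_nil]
      · simp [pvPrep]
      · omega
    | cons c rest =>
      rw [PySem.Chars.splitOn.go]
      by_cases hc : c = '\n'
      · subst hc
        have hpre : List.isPrefixOf ['\n'] ('\n' :: rest) = true := by
          simp
        rw [if_pos hpre]
        simp only [List.length_singleton, List.drop_succ_cons, List.drop_zero]
        rw [ih rest [] (cur.reverse :: acc) (by simpa using Nat.le_of_succ_le_succ hle)]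
        rw [pvLines_cons_nl]
        simp only [List.reverse_nil]
        rw [pvPrep_nil _ (pvLines_ne_nil rest)]
        simp [pvPrep]
      · have hpre : ¬ (List.isPrefixOf ['\n'] (c :: rest) = true) := by
          rw [List.isPrefixOf_iff_prefix, List.cons_prefix_cons]
          rintro ⟨h1, -⟩; exact hc h1.symm
        rw [if_neg hpre]
        rw [ih rest (c :: cur) acc (by simpa using Nat.le_of_succ_le_succ hle)]
        rw [pvLines_cons_notnl c rest (by simp [pvNotNl, hc])]
        rw [show (c :: cur).reverse = cur.reverse ++ [c] from by simp]
        rw [pvPrep_prep]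

theorem pvSplitOn_eq_pvLines (s : List Char) :
    PySem.Chars.splitOn s ['\n'] = pvLines s := by
  rw [PySem.Chars.splitOn, pvSplitOn_go_spec (s.length + 1) s [] [] (Nat.le_succ _)]
  simp [pvPrep_nil _ (pvLines_ne_nil s)]

theorem pvRstrip_prefix (y : List Char) : PySem.Chars.rstrip y <+: y := by
  have h := List.reverse_prefix.mpr (List.dropWhile_suffix (l := y.reverse) PySem.Chars.isspace)
  simpa [PySem.Chars.rstrip] using h

-- 'speaker:' has no whitespace char, so stripping the right end cannot affect the prefix test
theorem pvStartswith_rstrip (y : List Char) :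
    PySem.Chars.startswith (PySem.Chars.rstrip y) ("speaker:".toList) =
    PySem.Chars.startswith y ("speaker:".toList) := by
  simp only [PySem.Chars.startswith]
  rcases Decidable.em ("speaker:".toList <+: y) with h | h
  · obtain ⟨t, rfl⟩ := h
    simp only [PySem.Chars.rstrip, List.reverse_append]
    rw [List.dropWhile_append]
    split
    · have hsp : List.dropWhile PySem.Chars.isspace ("speaker:".toList.reverse) =
          "speaker:".toList.reverse := by decide
      rw [hsp]
      simp
    · simp [List.reverse_append]
  · have h2 : ¬ ("speaker:".toList <+: PySem.Chars.rstrip y) :=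
      fun hp => h (hp.trans (pvRstrip_prefix y))
    have e1 : List.isPrefixOf "speaker:".toList (PySem.Chars.rstrip y) = false := by
      rw [← Bool.not_eq_true, List.isPrefixOf_iff_prefix]; exact h2
    have e2 : List.isPrefixOf "speaker:".toList y = false := by
      rw [← Bool.not_eq_true, List.isPrefixOf_iff_prefix]; exact h
    rw [e1, e2]

theorem pvDropWhile_congr {p q : Char → Bool} (l : List Char) (h : ∀ c ∈ l, p c = q c) :
    l.dropWhile p = l.dropWhile q := by
  induction l with
  | nil => rfl
  | cons x xs ih =>
    simp only [List.dropWhile_cons]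
    rw [h x (List.mem_cons_self), ih (fun c hc => h c (List.mem_cons_of_mem _ hc))]

-- on Dom characters other than '\n', Python's isspace agrees with Source B's ' \t\r\x0b\x0c' test
theorem pvWs_eq_isspace (c : Char) (hd : pvDomChar c = true) (hn : c ≠ '\n') :
    PySem.Chars.isspace c = pvIsWs c := by
  have hdom : ((32 ≤ c.toNat ∧ c.toNat ≤ 126 ∨ c.toNat = 9) ∨ c.toNat = 10) ∨ c.toNat = 13 := by
    simpa [pvDomChar, Bool.or_eq_true, Bool.and_eq_true, decide_eq_true_eq] using hd
  have hn' : c.toNat ≠ 10 := fun h =>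
    hn (Char.ext (UInt32.toNat_inj.mp (h.trans (by decide))))
  have key : c.toNat = 9 ∨ c.toNat = 13 ∨ c.toNat = 32 ∨
      (32 < c.toNat ∧ c.toNat ≤ 126) := by omega
  rcases key with h9 | h13 | h32 | ⟨hlo, hhi⟩
  · rw [Char.ext (UInt32.toNat_inj.mp (h9.trans (show ('\t' : Char).toNat = 9 from rfl).symm))]
    decide
  · rw [Char.ext (UInt32.toNat_inj.mp (h13.trans (show ('\r' : Char).toNat = 13 from rfl).symm))]
    decide
  · rw [Char.ext (UInt32.toNat_inj.mp (h32.trans (show (' ' : Char).toNat = 32 from rfl).symm))]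
    decide
  · have hne : ∀ d : Char, c ≠ d → (c == d) = false := by
      intro d hne; simpa using hne
    have hia : PySem.Chars.isspace c = false := by
      simp only [PySem.Chars.isspace]
      simp only [Bool.or_eq_false_iff, Bool.and_eq_false_iff, decide_eq_false_iff_not]
      omega
    have hib : pvIsWs c = false := by
      simp only [pvIsWs, Bool.or_eq_false_iff]
      refine ⟨⟨⟨⟨?_, ?_⟩, ?_⟩, ?_⟩, ?_⟩ <;>
        · apply hne
          intro hc
          rw [hc] at hlo hhi
          simp at hlo hhi
    rw [hia, hib]

-- the per-line conditions of A and B agree on Dom lines without '\n'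
theorem pvCond_eq (line : List Char) (hd : ∀ c ∈ line, pvDomChar c = true)
    (hn : ∀ c ∈ line, c ≠ '\n') :
    PySem.Chars.startswith (PySem.Chars.strip line) ("speaker:".toList) =
    PySem.Chars.startswith (line.dropWhile pvIsWs) ("speaker:".toList) := by
  rw [PySem.Chars.strip, pvStartswith_rstrip, PySem.Chars.lstrip]
  rw [pvDropWhile_congr line (fun c hc => pvWs_eq_isspace c (hd c hc) (hn c hc))]

theorem pvLines_drop_nil (x : List Char) (h : List.dropWhile pvNotNl x = []) :
    pvLines x = [x.takeWhile pvNotNl] := by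
  rw [pvLines]
  split
  · rfl
  · simp_all

theorem pvLines_drop_cons (x : List Char) (hd : Char) (rs : List Char)
    (h : List.dropWhile pvNotNl x = hd :: rs) :
    pvLines x = x.takeWhile pvNotNl :: pvLines rs := by
  rw [pvLines]
  split
  · simp_all
  · rename_i heq
    rw [h] at heq
    cases heq
    rfl

theorem pvAltGo_drop_nil (repl : List Char) (x : List Char) (h : List.dropWhile pvNotNl x = []) :
    pvAltGo repl x = (if PySem.Chars.startswith ((x.takeWhile pvNotNl).dropWhile pvIsWs) ("speaker:".toList) then repl else x.takeWhile pvNotNl) := by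
  rw [pvAltGo]
  split
  · rfl
  · simp_all

theorem pvAltGo_drop_cons (repl : List Char) (x : List Char) (hd : Char) (rs : List Char)
    (h : List.dropWhile pvNotNl x = hd :: rs) :
    pvAltGo repl x = (if PySem.Chars.startswith ((x.takeWhile pvNotNl).dropWhile pvIsWs) ("speaker:".toList) then repl else x.takeWhile pvNotNl) ++ '\n' :: pvAltGo repl rs := by
  rw [pvAltGo]
  split
  · simp_all
  · rename_i heq
    rw [h] at heq
    cases heq
    rfl

theorem pvJoin_map_eq_altGo (repl : List Char) (cs : List Char)
    (hd : ∀ c ∈ cs, pvDomChar c = true) :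
    PySem.Chars.join ['\n'] ((pvLines cs).map (fun line =>
      if PySem.Chars.startswith (PySem.Chars.strip line) ("speaker:".toList) then repl else line)) =
    pvAltGo repl cs := by
  induction cs using pvAltGo.induct repl with
  | case1 x h =>
    have hnn : ∀ c ∈ x.takeWhile pvNotNl, c ≠ '\n' := by
      intro c hc
      have := List.mem_takeWhile_imp hc
      simpa [pvNotNl] using this
    have hdd : ∀ c ∈ x.takeWhile pvNotNl, pvDomChar c = true :=
      fun c hc => hd c ((List.takeWhile_sublist pvNotNl).mem hc)
    rw [pvAltGo_drop_nil repl x h, pvLines_drop_nil x h, List.map_singleton,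
      PySem.Chars.join_singleton, pvCond_eq _ hdd hnn]
  | case2 x head rs h ih =>
    have hsub : (head :: rs).Sublist x := by
      have := List.dropWhile_sublist (l := x) pvNotNl
      rwa [h] at this
    have hdrs : ∀ c ∈ rs, pvDomChar c = true :=
      fun c hc => hd c (hsub.mem (List.mem_cons_of_mem _ hc))
    have hnn : ∀ c ∈ x.takeWhile pvNotNl, c ≠ '\n' := by
      intro c hc
      have := List.mem_takeWhile_imp hc
      simpa [pvNotNl] using this
    have hdd : ∀ c ∈ x.takeWhile pvNotNl, pvDomChar c = true :=
      fun c hc => hd c ((List.takeWhile_sublist pvNotNl).mem hc)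
    rw [pvAltGo_drop_cons repl x head rs h, pvLines_drop_cons x head rs h]
    obtain ⟨b, L, hbl⟩ := List.exists_cons_of_ne_nil (pvLines_ne_nil rs)
    have ihx := ih hdrs
    rw [hbl] at ihx ⊢
    simp only [List.map_cons] at ihx ⊢
    rw [PySem.Chars.join_cons_cons, ihx, pvCond_eq _ hdd hnn]
    simp

-- ===== VERDICT (by name: the statement is the Claim_ definition above) =====
theorem update_speaker_field_spec : Claim_equal_update_speaker_field := by
  intro fm cn hdom
  have hd : ∀ c ∈ fm.toList, pvDomChar c = true := by
    have := hdom
    simp only [Dom_update_speaker_field, pvDomStr, Bool.and_eq_true, List.all_eq_true] at this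
    exact fun c hc => this.1 c hc
  unfold Spec_update_speaker_field update_speaker_field update_speaker_field_alt
  simp only [pvSplitOn_eq_pvLines]
  rw [show (fun (acc : List (List Char)) (line : List Char) =>
      let stripped := PySem.Chars.strip line
      if PySem.Chars.startswith stripped ("speaker:".toList) then
        acc ++ [("speaker: ".toList ++ cn.toList)]
      else acc ++ [line]) = (fun acc line => acc ++
        [if PySem.Chars.startswith (PySem.Chars.strip line) ("speaker:".toList) then
          ("speaker: ".toList ++ cn.toList) else line]) from by
    funext acc line
    by_cases h : PySem.Chars.startswith (PySem.Chars.strip line) ("speaker:".toList) = true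
    · rw [if_pos h, if_pos h]
    · rw [if_neg h, if_neg h]]
  rw [PySem.List.foldl_append_singleton_eq_map]
  rw [List.nil_append]
  rw [pvJoin_map_eq_altGo _ _ hd]
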